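-- pv_equiv track=rewrite | github.com/kush250/Text-Based_Adventure_Game | test_adventure.py | match_input
-- ===== SOURCE A (Python) =====
-- def match_input(string_input, options_valid):
--     verb_matches = []
--     for verbe in options_valid:
--         if verbe == string_input:
--             return [verbe]
--         else:
--             if string_input in verbe:
--                 verb_matches.append(verbe)
--     return verb_matches
-- ===== SOURCE B (Python) =====
-- def match_input(string_input, options_valid):
--     if string_input in options_valid:
--         return [string_input]
--     return [v for v in options_valid if string_input in v]
-- ===== Notes on version B (the rewrite author's own statement) =====
-- stated objective: simpler
-- what changed: Replaces A's fused early-return loop with accumulator by a plain membership test (exact match wins and discards partial matches) followed by a filter comprehension over the options.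
import Mathlib
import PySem

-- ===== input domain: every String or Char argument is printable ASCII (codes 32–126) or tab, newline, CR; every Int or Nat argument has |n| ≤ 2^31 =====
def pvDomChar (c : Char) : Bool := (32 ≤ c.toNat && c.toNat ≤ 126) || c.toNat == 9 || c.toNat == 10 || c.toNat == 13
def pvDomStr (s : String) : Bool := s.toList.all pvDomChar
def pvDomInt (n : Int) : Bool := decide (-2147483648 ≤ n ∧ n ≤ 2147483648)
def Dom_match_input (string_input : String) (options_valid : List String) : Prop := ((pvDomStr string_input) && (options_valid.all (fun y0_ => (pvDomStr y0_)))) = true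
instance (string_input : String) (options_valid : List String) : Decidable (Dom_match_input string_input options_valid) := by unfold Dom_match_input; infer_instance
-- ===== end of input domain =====

-- B replaces A's fused early-return loop by a membership test then a filter (objective: simpler).

-- ===== PORT A =====
-- loop over options_valid carrying the verb_matches accumulator (A's fused early-return loop)
def matchInputLoop (string_input : String) (l : List String) (verb_matches : List String) : List String :=
  match l with
  | [] => verb_matches
  | verbe :: rest =>
    if verbe == string_input then [verbe]
    else if PySem.Str.isIn string_input verbe then matchInputLoop string_input rest (verb_matches ++ [verbe])
    else matchInputLoop string_input rest verb_matches

def match_input (string_input : String) (options_valid : List String) : List String :=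
  matchInputLoop string_input options_valid []

-- ===== PORT B =====
-- B: exact membership test, else a filter of the substring matches
def match_input_alt (string_input : String) (options_valid : List String) : List String :=
  if options_valid.contains string_input then [string_input]
  else options_valid.filter (fun v => PySem.Str.isIn string_input v)

-- ===== PRECONDITION & SPEC =====
def Spec_match_input (string_input : String) (options_valid : List String) (out : List String) : Prop := out = match_input_alt string_input options_valid
instance (string_input : String) (options_valid : List String) (out : List String) : Decidable (Spec_match_input string_input options_valid out) := by unfold Spec_match_input; infer_instance

-- ===== CLAIM (what is proved, stated in full; the proofs are below) =====
def Claim_equal_match_input : Prop := ∀ (string_input : String) (options_valid : List String), Dom_match_input string_input options_valid → Spec_match_input string_input options_valid (match_input string_input options_valid)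

-- ===== LEMMAS AND PROOFS =====
-- loop invariant: the fused loop equals membership-test-then-filter, prefixed by the accumulator
lemma loop_eq (s : String) (l : List String) (acc : List String) :
    matchInputLoop s l acc =
      if l.contains s then [s] else acc ++ l.filter (fun v => PySem.Str.isIn s v) := by
  induction l generalizing acc with
  | nil => simp [matchInputLoop]
  | cons v t ih =>
    by_cases hv : v = s
    · subst hv
      simp [matchInputLoop]
    · have hne : (v == s) = false := by simp [hv]
      have hv' : ¬ s = v := fun h => hv h.symm
      have hIn : PySem.Str.isIn s v = PySem.Chars.isIn s.toList v.toList := rfl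
      by_cases hin : PySem.Chars.isIn s.toList v.toList = true <;>
      by_cases hm : s ∈ t <;>
      simp [matchInputLoop, hne, ih, hv', hm, hin]

-- ===== VERDICT (by name: the statement is the Claim_ definition above) =====
theorem match_input_spec : Claim_equal_match_input := by
  intro s opts _
  unfold Spec_match_input match_input match_input_alt
  rw [loop_eq]
  simp
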